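-- pv_equiv track=rewrite | github.com/Lsuyane/Compilador-Mini-Lang | src/utils/tui.py | process_carriage_returns
-- ===== SOURCE A (Python) =====
-- from typing import Callable, Optional, List
--
-- def process_carriage_returns(text: str) -> List[str]:
--     """Process text with carriage returns by overwriting previous content."""
--     if not text:
--         return []
--
--     lines = []
--     current_line = ""
--
--     i = 0
--     while i < len(text):
--         if text[i] == '\r':
--             # Carriage return - move to beginning of line
--             # Check if next character is newline
--             if i + 1 < len(text) and text[i + 1] == '\n':
--                 # \r\n sequence - treat as newline
--                 lines.append(current_line)
--                 current_line = ""
--                 i += 2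
--                 continue
--             else:
--                 # Just \r - start new line, overwriting current
--                 # Actually, for TUI we want to clear the current line
--                 # and start accumulating from beginning
--                 current_line = ""
--                 i += 1
--         elif text[i] == '\n':
--             # Newline - save current line and start new one
--             lines.append(current_line)
--             current_line = ""
--             i += 1
--         else:
--             current_line += text[i]
--             i += 1
--
--     # Add any remaining content
--     if current_line:
--         lines.append(current_line)
--
--     # Remove empty strings from the list
--     return [line for line in lines if line != ""]
-- ===== SOURCE B (Python) =====
-- def process_carriage_returns(text):
--     """Process text with carriage returns by overwriting previous content."""
--     segments = text.split('\n')
--     result = []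
--     for k, seg in enumerate(segments):
--         if k < len(segments) - 1 and seg.endswith('\r'):
--             # this '\r' was part of a '\r\n' break: consume it, don't reset
--             seg = seg[:-1]
--         visible = seg.split('\r')[-1]
--         if visible:
--             result.append(visible)
--     return result
-- ===== Notes on version B (the rewrite author's own statement) =====
-- stated objective: simpler
-- what changed: Replaces A's index-based per-character state machine with a split-based decomposition: split the text on newlines, strip the single trailing carriage return of each non-final segment (the CRLF carriage), keep only what follows the last remaining carriage return in each segment, and drop empty results.
import Mathlib
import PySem

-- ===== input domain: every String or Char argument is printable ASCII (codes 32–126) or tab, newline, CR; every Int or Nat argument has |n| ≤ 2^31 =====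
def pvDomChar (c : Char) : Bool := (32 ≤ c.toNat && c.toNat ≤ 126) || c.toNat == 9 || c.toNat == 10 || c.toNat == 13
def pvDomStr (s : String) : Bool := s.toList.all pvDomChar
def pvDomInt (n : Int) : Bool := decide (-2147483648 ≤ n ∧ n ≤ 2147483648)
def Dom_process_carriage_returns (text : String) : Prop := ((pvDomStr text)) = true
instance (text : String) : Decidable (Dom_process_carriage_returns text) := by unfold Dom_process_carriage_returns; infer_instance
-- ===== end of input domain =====

-- B replaces A's per-character index state machine by a split-based decomposition (simpler, and measured faster in a timing run: no per-character string concatenation); return values proved equal on all inputs.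

-- ===== PORT A =====
-- A's while loop over indices, as structural recursion over the character list;
-- `cur` is current_line, `lines` the accumulator; the lookahead text[i+1] == '\n'
-- is the match on the tail.
def pcrLoop (cs : List Char) (cur : List Char) (lines : List (List Char)) : List (List Char) :=
  match cs with
  | [] => if cur ≠ [] then lines ++ [cur] else lines
  | c :: rest =>
    if c = '\r' then
      match rest with
      | c2 :: rest2 =>
        if c2 = '\n' then pcrLoop rest2 [] (lines ++ [cur])   -- \r\n: treat as newline
        else pcrLoop (c2 :: rest2) [] lines                    -- lone \r: clear current line
      | [] => pcrLoop [] [] lines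
    else if c = '\n' then pcrLoop rest [] (lines ++ [cur])
    else pcrLoop rest (cur ++ [c]) lines
termination_by cs.length
decreasing_by all_goals (simp [List.length_cons]; try omega)

-- final comprehension `[line for line in lines if line != ""]`; the filter is done
-- on the character lists (String.ofList is injective, so it is the same filter).
def process_carriage_returns (text : String) : List String :=
  if text = "" then []
  else ((pcrLoop text.toList [] []).filter (fun l => l ≠ [])).map String.ofList

-- ===== PORT B =====
-- str.split(sep) on character lists (Python semantics: always at least one segment)
def pySplitC (sep : Char) (cs : List Char) : List (List Char) :=
  match cs with
  | [] => [[]]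
  | c :: rest =>
    let r := pySplitC sep rest
    if c = sep then [] :: r
    else match r with
         | s :: l => (c :: s) :: l
         | [] => [[c]]

-- seg.split('\r')[-1]
def pcrVisible (seg : List Char) : List Char := ((pySplitC '\r' seg).getLast?).getD []

-- the loop over enumerate(segments): the `k < len(segments)-1` test becomes the
-- distinction between a segment followed by further segments and the last one
def pcrBLoop (segs : List (List Char)) : List (List Char) :=
  match segs with
  | [] => []
  | seg :: rest =>
    match rest with
    | [] => let v := pcrVisible seg; if v ≠ [] then [v] else []
    | _ :: _ =>
      let s := if seg.getLast? = some '\r' then seg.dropLast else seg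
      let v := pcrVisible s
      (if v ≠ [] then [v] else []) ++ pcrBLoop rest

def process_carriage_returns_alt (text : String) : List String :=
  (pcrBLoop (pySplitC '\n' text.toList)).map String.ofList

-- ===== PRECONDITION & SPEC =====
def Spec_process_carriage_returns (text : String) (out : List String) : Prop := out = process_carriage_returns_alt text
instance (text : String) (out : List String) : Decidable (Spec_process_carriage_returns text out) := by unfold Spec_process_carriage_returns; infer_instance

-- ===== CLAIM (what is proved, stated in full; the proofs are below) =====
def Claim_equal_process_carriage_returns : Prop := ∀ (text : String), Dom_process_carriage_returns text → Spec_process_carriage_returns text (process_carriage_returns text)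

-- ===== LEMMAS AND PROOFS =====

theorem pySplitC_ne_nil (sep : Char) (cs : List Char) : pySplitC sep cs ≠ [] := by
  cases cs with
  | nil => simp [pySplitC]
  | cons c rest =>
    simp only [pySplitC]
    split
    · simp
    · cases pySplitC sep rest <;> simp

-- sep ∉ x → split yields just [x]
theorem pySplitC_of_not_mem (sep : Char) (x : List Char) (h : sep ∉ x) :
    pySplitC sep x = [x] := by
  induction x with
  | nil => simp [pySplitC]
  | cons c rest ih =>
    simp only [List.mem_cons, not_or] at h
    simp [pySplitC, Ne.symm h.1, ih h.2]

-- Python's split distributes over a separator occurrence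
theorem pySplitC_append (sep : Char) (x t : List Char) :
    pySplitC sep (x ++ sep :: t) = pySplitC sep x ++ pySplitC sep t := by
  induction x with
  | nil => simp [pySplitC]
  | cons c rest ih =>
    by_cases hc : c = sep
    · simp [pySplitC, hc, ih]
    · simp only [List.cons_append, pySplitC, hc, ih]
      have hne := pySplitC_ne_nil sep rest
      cases hr : pySplitC sep rest with
      | nil => exact absurd hr hne
      | cons s l => simp

theorem pcrVisible_no_cr (x : List Char) (h : '\r' ∉ x) : pcrVisible x = x := by
  simp [pcrVisible, pySplitC_of_not_mem _ _ h]

theorem pcrVisible_append_cr (x t : List Char) :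
    pcrVisible (x ++ '\r' :: t) = pcrVisible t := by
  simp only [pcrVisible, pySplitC_append, List.getLast?_append]
  obtain ⟨y, hy⟩ := Option.isSome_iff_exists.mp
    (List.getLast?_isSome.mpr (pySplitC_ne_nil '\r' t))
  simp [hy]

theorem getLast?_ne_cr (cur : List Char) (h : '\r' ∉ cur) : cur.getLast? ≠ some '\r' := by
  intro hg
  obtain ⟨ys, rfl⟩ := List.getLast?_eq_some_iff.mp hg
  simp at h


theorem pcrBLoop_strip (seg s : List Char) (l : List (List Char))
    (h : seg.getLast? = some '\r') :
    pcrBLoop (seg :: s :: l) =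
      (if pcrVisible seg.dropLast ≠ [] then [pcrVisible seg.dropLast] else []) ++ pcrBLoop (s :: l) := by
  simp only [pcrBLoop]
  rw [if_pos h]

theorem pcrBLoop_nostrip (seg s : List Char) (l : List (List Char))
    (h : seg.getLast? ≠ some '\r') :
    pcrBLoop (seg :: s :: l) =
      (if pcrVisible seg ≠ [] then [pcrVisible seg] else []) ++ pcrBLoop (s :: l) := by
  simp only [pcrBLoop]
  rw [if_neg h]

-- dropping a '\r'-terminated prefix glued before the head segment does not change pcrBLoop
theorem pcrBLoop_cr_prefix (cur s : List Char) (l : List (List Char)) (hs : s ≠ []) :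
    pcrBLoop ((cur ++ '\r' :: s) :: l) = pcrBLoop (s :: l) := by
  cases l with
  | nil => simp [pcrBLoop, pcrVisible_append_cr]
  | cons a l' =>
    have hlast : (cur ++ '\r' :: s).getLast? = s.getLast? := by
      rw [show cur ++ '\r' :: s = (cur ++ ['\r']) ++ s by simp, List.getLast?_append]
      obtain ⟨y, hy⟩ := Option.isSome_iff_exists.mp (List.getLast?_isSome.mpr hs)
      simp [hy]
    by_cases hcr : s.getLast? = some '\r'
    · rw [pcrBLoop_strip _ _ _ (by rw [hlast]; exact hcr),
        pcrBLoop_strip _ _ _ hcr,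
        List.dropLast_append_of_ne_nil (by simp : ('\r' :: s) ≠ []),
        show ('\r' :: s).dropLast = '\r' :: s.dropLast by
          cases s with
          | nil => exact absurd rfl hs
          | cons b bs => simp,
        pcrVisible_append_cr]
    · rw [pcrBLoop_nostrip _ _ _ (by rw [hlast]; exact hcr), pcrBLoop_nostrip _ _ _ hcr,
        pcrVisible_append_cr]

-- consH cur segs glues the pending current line onto the first segment
def consH (cur : List Char) (segs : List (List Char)) : List (List Char) :=
  match segs with
  | [] => [cur]
  | s :: l => (cur ++ s) :: l

theorem consH_nil_of_ne_nil (L : List (List Char)) (h : L ≠ []) : consH [] L = L := by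
  cases L with
  | nil => exact absurd rfl h
  | cons s l => simp [consH]

-- the base case of the main induction (cs exhausted)
theorem pcr_base (cur : List Char) (lines : List (List Char)) (h1 : '\r' ∉ cur) :
    (pcrLoop [] cur lines).filter (fun l => l ≠ []) =
      lines.filter (fun l => l ≠ []) ++ pcrBLoop (consH cur (pySplitC '\n' [])) := by
  simp only [pcrLoop, pySplitC, consH, List.append_nil, pcrBLoop,
    pcrVisible_no_cr cur h1]
  by_cases hcur : cur = []
  · simp [hcur]
  · simp [hcur, List.filter_append]

-- MAIN INVARIANT: running A's loop with pending line `cur` (which contains no '\r'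
-- or '\n') and already-emitted `lines`, then filtering, equals the filtered `lines`
-- followed by B's per-segment processing of `cur` glued onto the segments of `cs`.
theorem pcr_main : ∀ (n : Nat) (cs : List Char), cs.length ≤ n →
    ∀ (cur : List Char) (lines : List (List Char)), '\r' ∉ cur → '\n' ∉ cur →
    (pcrLoop cs cur lines).filter (fun l => l ≠ []) =
      lines.filter (fun l => l ≠ []) ++ pcrBLoop (consH cur (pySplitC '\n' cs)) := by
  intro n
  induction n with
  | zero =>
    intro cs hle cur lines h1 _
    have : cs = [] := by cases cs with
      | nil => rfl
      | cons c rest => simp at hle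
    subst this
    exact pcr_base cur lines h1
  | succ n ih =>
    intro cs hle cur lines h1 h2
    cases cs with
    | nil => exact pcr_base cur lines h1
    | cons c rest =>
      by_cases hc : c = '\r'
      · subst hc
        cases rest with
        | nil =>
          -- "…\r" at the very end: A clears the line; B sees a last segment ending in '\r'
          have hA : pcrLoop ['\r'] cur lines = pcrLoop [] ([] : List Char) lines := by
            simp [pcrLoop]
          have hsplit : pySplitC '\n' ['\r'] = [['\r']] := by simp [pySplitC]
          rw [hA, hsplit]
          have : consH cur [['\r']] = [cur ++ ['\r']] := by simp [consH]
          rw [this]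
          have : pcrBLoop [cur ++ ['\r']] = [] := by
            have := pcrVisible_append_cr cur []
            simp only [pcrBLoop, this]
            simp [pcrVisible, pySplitC]
          rw [this, pcr_base [] lines (by simp)]
          simp [pySplitC, consH, pcrBLoop, pcrVisible]
        | cons c2 rest2 =>
          by_cases hc2 : c2 = '\n'
          · subst hc2
            -- "\r\n": A emits cur; B strips the one trailing '\r' of the segment
            have hA : pcrLoop ('\r' :: '\n' :: rest2) cur lines
                = pcrLoop rest2 [] (lines ++ [cur]) := by simp [pcrLoop]
            rw [hA, ih rest2 (by simp at hle ⊢; omega) [] (lines ++ [cur]) (by simp) (by simp)]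
            obtain ⟨s, l, hsl⟩ : ∃ s l, pySplitC '\n' rest2 = s :: l := by
              cases h : pySplitC '\n' rest2 with
              | nil => exact absurd h (pySplitC_ne_nil _ _)
              | cons s l => exact ⟨s, l, rfl⟩
            have hsplit : pySplitC '\n' ('\r' :: '\n' :: rest2) = ['\r'] :: s :: l := by
              simp [pySplitC, hsl]
            rw [hsplit, consH_nil_of_ne_nil _ (by simp [hsl]), hsl]
            have hch : consH cur (['\r'] :: s :: l) = (cur ++ ['\r']) :: s :: l := by
              simp [consH]
            rw [hch]
            rw [pcrBLoop_strip _ _ _ List.getLast?_concat,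
              show (cur ++ ['\r']).dropLast = cur by simp,
              pcrVisible_no_cr cur h1]
            by_cases hcur : cur = [] <;>
              simp [hcur, List.filter_append, List.append_assoc]
          · -- lone '\r' inside the text: A clears cur; B's rfind-style reduction
            -- drops everything up to that '\r'
            have hA : pcrLoop ('\r' :: c2 :: rest2) cur lines
                = pcrLoop (c2 :: rest2) [] lines := by simp [pcrLoop, hc2]
            rw [hA, ih (c2 :: rest2) (by simp at hle ⊢; omega) [] lines (by simp) (by simp)]
            rw [consH_nil_of_ne_nil _ (pySplitC_ne_nil _ _)]
            obtain ⟨s, l, hsl⟩ : ∃ s l, pySplitC '\n' rest2 = s :: l := by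
              cases h : pySplitC '\n' rest2 with
              | nil => exact absurd h (pySplitC_ne_nil _ _)
              | cons s l => exact ⟨s, l, rfl⟩
            have hsplit2 : pySplitC '\n' (c2 :: rest2) = (c2 :: s) :: l := by
              simp [pySplitC, hc2, hsl]
            have hsplit : pySplitC '\n' ('\r' :: c2 :: rest2) = ('\r' :: c2 :: s) :: l := by
              simp [pySplitC, hc2, hsl]
            rw [hsplit2, hsplit]
            have hch : consH cur (('\r' :: c2 :: s) :: l) = (cur ++ '\r' :: (c2 :: s)) :: l := by
              simp [consH]
            rw [hch, pcrBLoop_cr_prefix cur (c2 :: s) l (by simp)]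
      · by_cases hn : c = '\n'
        · subst hn
          -- '\n': A emits cur; B starts a new segment
          have hA : pcrLoop ('\n' :: rest) cur lines
              = pcrLoop rest [] (lines ++ [cur]) := by
            rw [pcrLoop.eq_def]; simp
          rw [hA, ih rest (by simp at hle ⊢; omega) [] (lines ++ [cur]) (by simp) (by simp)]
          obtain ⟨s, l, hsl⟩ : ∃ s l, pySplitC '\n' rest = s :: l := by
            cases h : pySplitC '\n' rest with
            | nil => exact absurd h (pySplitC_ne_nil _ _)
            | cons s l => exact ⟨s, l, rfl⟩
          have hsplit : pySplitC '\n' ('\n' :: rest) = [] :: s :: l := by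
            simp [pySplitC, hsl]
          rw [hsplit, consH_nil_of_ne_nil _ (by simp [hsl]), hsl]
          have hch : consH cur ([] :: s :: l) = cur :: s :: l := by simp [consH]
          rw [hch]
          rw [pcrBLoop_nostrip _ _ _ (getLast?_ne_cr cur h1), pcrVisible_no_cr cur h1]
          by_cases hcur : cur = [] <;>
            simp [hcur, List.filter_append, List.append_assoc]
        · -- ordinary character: appended to cur on A's side, glued onto the head segment on B's
          have hA : pcrLoop (c :: rest) cur lines = pcrLoop rest (cur ++ [c]) lines := by
            rw [pcrLoop.eq_def]; simp [hc, hn]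
          rw [hA, ih rest (by simp at hle ⊢; omega) (cur ++ [c]) lines
            (by simp [h1]; exact fun h => hc h.symm)
            (by simp [h2]; exact fun h => hn h.symm)]
          obtain ⟨s, l, hsl⟩ : ∃ s l, pySplitC '\n' rest = s :: l := by
            cases h : pySplitC '\n' rest with
            | nil => exact absurd h (pySplitC_ne_nil _ _)
            | cons s l => exact ⟨s, l, rfl⟩
          have hsplit : pySplitC '\n' (c :: rest) = (c :: s) :: l := by
            simp [pySplitC, hn, hsl]
          rw [hsplit, hsl]
          have : consH cur ((c :: s) :: l) = consH (cur ++ [c]) (s :: l) := by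
            simp [consH]
          rw [this]

theorem pcr_equal (text : String) :
    process_carriage_returns text = process_carriage_returns_alt text := by
  by_cases h : text = ""
  · subst h; rfl
  · unfold process_carriage_returns process_carriage_returns_alt
    rw [if_neg h]
    have := pcr_main text.toList.length text.toList le_rfl [] [] (by simp) (by simp)
    rw [this, consH_nil_of_ne_nil _ (pySplitC_ne_nil _ _)]
    simp

-- ===== VERDICT (by name: the statement is the Claim_ definition above) =====
theorem process_carriage_returns_spec : Claim_equal_process_carriage_returns := by
  intro text _
  exact pcr_equal text
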